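-- pv_equiv track=rewrite | github.com/tomoya0318/PM25 | src/pattern/diff2sequence.py | merge_consecutive_tokens
-- ===== SOURCE A (Python) =====
-- def merge_consecutive_tokens(diff: list[str]) -> list[str]:
--     """連続するトークンを結合する．
--
--     Args:
--         diff (list): トークンのリスト
--
--     Returns:
--         list: 結合されたトークンのリスト
--     """
--     if not diff:
--         return []
--
--     merged_diff = []
--     current_token = diff[0]
--
--     for token in diff[1:]:
--         if current_token.startswith(("-", "+", "=")) and token.startswith(current_token[0]):
--             current_token += token[1:]
--             continue
--         merged_diff.append(current_token)
--         current_token = token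
--
--     merged_diff.append(current_token)
--     return merged_diff
-- ===== SOURCE B (Python) =====
-- def merge_consecutive_tokens(diff: list[str]) -> list[str]:
--     """連続するトークンを結合する．(group-at-once reimplementation)"""
--     res = []
--     rest = diff[::-1]          # reversed copy; pop() yields tokens in original order
--     while rest:
--         head = rest.pop()
--         if head and head[0] in "-+=":
--             c = head[0]
--             parts = [head]
--             while rest and rest[-1].startswith(c):
--                 parts.append(rest.pop()[1:])
--             head = "".join(parts)
--         res.append(head)
--     return res
-- ===== Notes on version B (the rewrite author's own statement) =====
-- stated objective: alternative
-- what changed: B finds each run of same-sign tokens as a whole (pop the run off a reversed stack, join its tails once) instead of A's token-by-token running accumulator flushed inside the loop.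
import Mathlib
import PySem

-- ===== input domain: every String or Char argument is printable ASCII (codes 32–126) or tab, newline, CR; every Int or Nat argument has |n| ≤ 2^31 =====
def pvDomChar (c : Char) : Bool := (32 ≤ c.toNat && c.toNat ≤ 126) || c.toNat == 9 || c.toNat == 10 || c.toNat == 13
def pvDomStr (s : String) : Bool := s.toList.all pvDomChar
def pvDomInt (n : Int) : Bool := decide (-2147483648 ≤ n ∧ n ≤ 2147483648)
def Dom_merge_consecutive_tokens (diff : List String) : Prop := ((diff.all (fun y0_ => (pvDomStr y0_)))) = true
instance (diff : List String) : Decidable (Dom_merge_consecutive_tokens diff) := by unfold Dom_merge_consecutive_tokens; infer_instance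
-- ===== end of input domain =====

-- B merges each whole sign-run in one step (span + join of tails) instead of A's
-- token-by-token accumulator flushed in-loop; objective: alternative decomposition.

-- ===== PORT A =====
-- A's merge condition: current_token.startswith(("-","+","=")) and token.startswith(current_token[0])
def pvCondA (cur tok : String) : Bool :=
  match cur.toList with
  | [] => false
  | c :: _ =>
    (c == '-' || c == '+' || c == '=') &&
      (match tok.toList with
       | [] => false
       | d :: _ => d == c)

-- the for-loop over diff[1:], state = (merged_diff, current_token)
def pvLoopA (acc : List String) (cur : String) : List String → List String
  | [] => acc ++ [cur]
  | t :: ts =>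
    if pvCondA cur t then
      pvLoopA acc (String.ofList (cur.toList ++ t.toList.drop 1)) ts
    else
      pvLoopA (acc ++ [cur]) t ts

def merge_consecutive_tokens (diff : List String) : List String :=
  match diff with
  | [] => []
  | t :: ts => pvLoopA [] t ts

-- ===== PORT B =====
-- inner while: pop tokens starting with c off the reversed stack = consume them from the
-- front of the remaining original-order list; returns (their tails, the rest)
def pvSpanB (c : Char) : List String → List (List Char) × List String
  | [] => ([], [])
  | t :: ts =>
    match t.toList with
    | [] => ([], t :: ts)
    | d :: _ =>
      if d == c then ((pvSpanB c ts).1.cons (t.toList.drop 1), (pvSpanB c ts).2)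
      else ([], t :: ts)

theorem pvSpanB_snd_length (c : Char) (ts : List String) :
    (pvSpanB c ts).2.length ≤ ts.length := by
  induction ts with
  | nil => simp [pvSpanB]
  | cons t ts ih =>
    unfold pvSpanB
    match t.toList with
    | [] => simp
    | d :: _ =>
      by_cases h : (d == c) = true
      · simp only [h, if_pos]; exact Nat.le_succ_of_le ih
      · simp [h]

-- outer while over the stack (modelled front-first, the order pop() yields)
def pvLoopB (res : List String) : List String → List String
  | [] => res
  | head :: rest =>
    match head.toList with
    | [] => pvLoopB (res ++ [head]) rest
    | c :: _ =>
      if c == '-' || c == '+' || c == '=' then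
        pvLoopB (res ++ [String.ofList (head.toList :: (pvSpanB c rest).1).flatten])
          ((pvSpanB c rest).2)
      else
        pvLoopB (res ++ [head]) rest
  termination_by rest => rest.length
  decreasing_by
    all_goals simp
    exact pvSpanB_snd_length _ _

def merge_consecutive_tokens_alt (diff : List String) : List String :=
  pvLoopB [] diff

-- ===== PRECONDITION & SPEC =====
def Spec_merge_consecutive_tokens (diff : List String) (out : List String) : Prop := out = merge_consecutive_tokens_alt diff
instance (diff : List String) (out : List String) : Decidable (Spec_merge_consecutive_tokens diff out) := by unfold Spec_merge_consecutive_tokens; infer_instance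

-- ===== CLAIM (what is proved, stated in full; the proofs are below) =====
def Claim_equal_merge_consecutive_tokens : Prop := ∀ (diff : List String), Dom_merge_consecutive_tokens diff → Spec_merge_consecutive_tokens diff (merge_consecutive_tokens diff)

-- ===== LEMMAS AND PROOFS =====

theorem pvLoopB_nil (res : List String) : pvLoopB res [] = res := by
  conv_lhs => rw [pvLoopB.eq_def]

theorem pvLoopB_empty (res : List String) (head : String) (rest : List String)
    (h : head.toList = []) :
    pvLoopB res (head :: rest) = pvLoopB (res ++ [head]) rest := by
  conv_lhs => rw [pvLoopB.eq_def]
  simp [h]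

theorem pvLoopB_sign (res : List String) (head : String) (rest : List String)
    (c : Char) (cs : List Char) (h : head.toList = c :: cs)
    (hs : (c == '-' || c == '+' || c == '=') = true) :
    pvLoopB res (head :: rest) =
      pvLoopB (res ++ [String.ofList (head.toList :: (pvSpanB c rest).1).flatten])
        ((pvSpanB c rest).2) := by
  conv_lhs => rw [pvLoopB.eq_def]
  simp [h, hs]

theorem pvLoopB_nosign (res : List String) (head : String) (rest : List String)
    (c : Char) (cs : List Char) (h : head.toList = c :: cs)
    (hs : ¬ (c == '-' || c == '+' || c == '=') = true) :
    pvLoopB res (head :: rest) = pvLoopB (res ++ [head]) rest := by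
  conv_lhs => rw [pvLoopB.eq_def]
  simp only [h]
  simp [hs]

theorem pvLoopA_eq_pvLoopB (ts : List String) (acc : List String) (cur : String) :
    pvLoopA acc cur ts = pvLoopB acc (cur :: ts) := by
  induction ts generalizing acc cur with
  | nil =>
    simp only [pvLoopA]
    match h : cur.toList with
    | [] => rw [pvLoopB_empty acc cur [] h, pvLoopB_nil]
    | c :: cs =>
      by_cases hs : (c == '-' || c == '+' || c == '=') = true
      · rw [pvLoopB_sign acc cur [] c cs h hs]
        simp [pvSpanB, pvLoopB_nil]
      · rw [pvLoopB_nosign acc cur [] c cs h hs, pvLoopB_nil]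
  | cons t ts ih =>
    simp only [pvLoopA]
    by_cases hc : pvCondA cur t = true
    · rw [if_pos hc, ih]
      -- both sides process the same group; A has absorbed one token already
      unfold pvCondA at hc
      match hcur : cur.toList with
      | [] => rw [hcur] at hc; simp at hc
      | c :: cs =>
        rw [hcur] at hc
        match ht : t.toList with
        | [] => rw [ht] at hc; simp at hc
        | d :: ds =>
          rw [ht] at hc
          simp only [Bool.and_eq_true, beq_iff_eq] at hc
          obtain ⟨hs, hd⟩ := hc
          subst hd
          have hmk : (String.ofList (d :: cs ++ List.drop 1 (d :: ds))).toList
              = d :: (cs ++ ds) := by simp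
          rw [pvLoopB_sign acc _ ts d (cs ++ ds) hmk hs,
            pvLoopB_sign acc cur (t :: ts) d cs hcur hs]
          have hsp : pvSpanB d (t :: ts)
              = ((t.toList.drop 1) :: (pvSpanB d ts).1, (pvSpanB d ts).2) := by
            conv_lhs => rw [pvSpanB.eq_def]
            simp [ht]
          rw [hsp, hmk, hcur]
          simp [ht]
    · rw [if_neg hc, ih]
      unfold pvCondA at hc
      match hcur : cur.toList with
      | [] => rw [pvLoopB_empty acc cur (t :: ts) hcur]
      | c :: cs =>
        rw [hcur] at hc
        by_cases hs : (c == '-' || c == '+' || c == '=') = true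
        · have hsp : pvSpanB c (t :: ts) = ([], t :: ts) := by
            simp only [hs, Bool.true_and] at hc
            unfold pvSpanB
            match ht : t.toList with
            | [] => rfl
            | d :: ds => rw [ht] at hc; simp_all
          rw [pvLoopB_sign acc cur (t :: ts) c cs hcur hs, hsp]
          simp
        · rw [pvLoopB_nosign acc cur (t :: ts) c cs hcur hs]

theorem merge_consecutive_tokens_spec : Claim_equal_merge_consecutive_tokens := by
  intro diff _
  unfold Spec_merge_consecutive_tokens merge_consecutive_tokens merge_consecutive_tokens_alt
  match diff with
  | [] => rw [pvLoopB_nil]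
  | t :: ts => exact pvLoopA_eq_pvLoopB ts [] t
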